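-- pv_equiv track=rewrite | github.com/HyeongSikkk/coding_test | programmers/250136/250136_2.py | solution
-- ===== SOURCE A (Python) =====
-- def solution(land) :
--     cols = {i : 0 for i in range(len(land[0]))}
--     class Gas :
--         def __init__(self) :
--             self.value = 0
--             self.min_col = len(land[0])
--             self.max_col = 0
--
--         def add(self) :
--             self.value += 1
--
--         def record_col(self, col) :
--             if self.min_col > col :
--                 self.min_col = col
--             if self.max_col < col :
--                 self.max_col = col
--
--         def report(self) :
--             for col in range(self.min_col, self.max_col+1) :
--                 cols[col] += self.value
--
--     def out_gas(row, col, g) :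
--         if row >= len(land) or col >= len(land[0]) or row < 0 or col < 0 :
--             return
--         if land[row][col] == 1 :
--             land[row][col] = 0
--             g.add()
--             g.record_col(col)
--             out_gas(row+1, col, g)
--             out_gas(row-1, col, g)
--             out_gas(row, col+1, g)
--             out_gas(row, col-1, g)
--
--
--     for row, line in enumerate(land) :
--         for col, gas in enumerate(line) :
--             if gas == 1 :
--                 g = Gas()
--                 out_gas(row, col, g)
--                 g.report()
--     return max(cols.values())
-- ===== SOURCE B (Python) =====
-- def solution(land):
--     rows, ncols = len(land), len(land[0])
--     sums = [0] * ncols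
--     for r0 in range(rows):
--         for c0 in range(ncols):
--             if land[r0][c0] == 1:
--                 count = 0
--                 mn = mx = c0
--                 stack = [(r0, c0)]
--                 while stack:
--                     r, c = stack.pop()
--                     if 0 <= r < rows and 0 <= c < ncols and land[r][c] == 1:
--                         land[r][c] = 0
--                         count += 1
--                         mn = min(mn, c)
--                         mx = max(mx, c)
--                         stack.extend(((r, c - 1), (r, c + 1), (r - 1, c), (r + 1, c)))
--                 for j in range(mn, mx + 1):
--                     sums[j] += count
--     return max(sums)
-- ===== Notes on version B (the rewrite author's own statement) =====
-- stated objective: idiomatic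
-- what changed: A's recursive out_gas DFS with a Gas class and a dict of column sums is replaced by an iterative explicit-stack flood fill over plain local variables and a plain list of column sums.
-- outside the precondition, e.g. on solution([[1], [1, 1]]): A returns 2, B returns 2; on solution([[0, 0], [0]]): A returns 0, B raises IndexError
import Mathlib
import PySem

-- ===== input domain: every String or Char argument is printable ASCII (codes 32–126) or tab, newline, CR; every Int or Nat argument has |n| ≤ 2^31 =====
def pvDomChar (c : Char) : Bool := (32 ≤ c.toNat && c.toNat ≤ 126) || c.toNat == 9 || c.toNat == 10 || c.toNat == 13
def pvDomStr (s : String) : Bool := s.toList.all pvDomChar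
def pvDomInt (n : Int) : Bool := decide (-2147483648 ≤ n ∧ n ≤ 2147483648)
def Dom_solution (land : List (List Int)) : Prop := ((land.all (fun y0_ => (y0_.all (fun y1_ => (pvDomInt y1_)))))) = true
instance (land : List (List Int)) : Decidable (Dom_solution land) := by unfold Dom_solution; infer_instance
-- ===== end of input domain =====

-- B replaces A's recursive out_gas DFS (class Gas + dict of column sums) by an iterative
-- explicit-stack flood fill over plain locals and a list of column sums (same return value).
-- Both A and B mutate `land` in place identically (found 1-cells are zeroed); the theorems
-- below are about the return value only.

-- ===== PORT A =====
-- land[row][col] read: used only under A's bounds guard (0 ≤ row < len(land), 0 ≤ col)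
-- and, inside Pre_solution (rectangular grid), col < len(land[row]); there Python
-- indexing is plain Nat indexing, so List.getD is exact.
def pvGetC (g : List (List Int)) (r c : Int) : Int := (g.getD r.toNat []).getD c.toNat 0

-- land[row][col] = v under the same in-range guarantee (List.set is exact there)
def pvSetC (g : List (List Int)) (r c : Nat) (v : Int) : List (List Int) :=
  g.set r ((g.getD r []).set c v)

-- number of 1-cells; used only as recursion fuel for the port of out_gas
def pvOnes (g : List (List Int)) : Nat := (g.map (fun row => row.count 1)).sum

-- g.add(); g.record_col(col)  on the Gas state (value, min_col, max_col)
def pvRecord (g : Int × Int × Int) (col : Int) : Int × Int × Int :=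
  (g.1 + 1, if g.2.1 > col then col else g.2.1, if g.2.2 < col then col else g.2.2)

-- out_gas(row, col, g), fuel-bounded: every recursive call is made just after a 1-cell
-- was zeroed, so the recursion depth never exceeds pvOnes grid + 1 and the fuel passed
-- at each call site in `solution` suffices (the fuel-0 branch is unreachable there).
def outGas (nrows ncols : Int) : Nat → List (List Int) → Int → Int → Int × Int × Int →
    List (List Int) × (Int × Int × Int)
  | 0, grid, _, _, g => (grid, g)
  | fuel+1, grid, row, col, g =>
    if row ≥ nrows ∨ col ≥ ncols ∨ row < 0 ∨ col < 0 then (grid, g)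
    else if pvGetC grid row col = 1 then
      let grid1 := pvSetC grid row.toNat col.toNat 0
      let p1 := outGas nrows ncols fuel grid1 (row+1) col (pvRecord g col)
      let p2 := outGas nrows ncols fuel p1.1 (row-1) col p1.2
      let p3 := outGas nrows ncols fuel p2.1 row (col+1) p2.2
      outGas nrows ncols fuel p3.1 row (col-1) p3.2
    else (grid, g)

-- g.report(): cols[col] += value for col in range(min_col, max_col+1)
-- (Dict.modify is exact for Python's `cols[col] += v` here: the key is always present)
def pvReport (cols : PySem.Dict Int Int) (g : Int × Int × Int) : PySem.Dict Int Int :=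
  (PySem.List.pyRange g.2.1 (g.2.2 + 1) 1).foldl (fun d c => d.modify c 0 (· + g.1)) cols

def solution (land : List (List Int)) : Int :=
  let nrows : Int := land.length
  let ncols : Int := (land.headD []).length       -- len(land[0]); land ≠ [] under Pre_
  let cols0 : PySem.Dict Int Int :=
    (PySem.List.pyRange 0 ncols 1).foldl (fun d i => d.insert i 0) PySem.Dict.empty
  -- the two enumerate loops read the CURRENT (mutated) grid, as Python's enumerate does;
  -- the inner bound is len(land[row]) (row lengths never change, only cell values do)
  let fin := (PySem.List.pyRange 0 nrows 1).foldl (fun st row =>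
      (PySem.List.pyRange 0 (((st.1.getD row.toNat []).length : Int)) 1).foldl (fun st col =>
        if pvGetC st.1 row col = 1 then
          let p := outGas nrows ncols (pvOnes st.1 + 1) st.1 row col (0, ncols, 0)
          (p.1, pvReport st.2 p.2)
        else st) st) (land, cols0)
  (PySem.List.max? fin.2.values (fun x => x)).getD 0   -- max(cols.values()), nonempty under Pre_

-- ===== PORT B =====
-- needed by floodLoop's termination proof: zeroing a 1-cell decreases the 1-count
theorem pvOnes_set (g : List (List Int)) (i : Nat) (x : List Int) (h : i < g.length) :
    pvOnes (g.set i x) + g[i].count 1 = pvOnes g + x.count 1 := by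
  induction g generalizing i with
  | nil => simp at h
  | cons hd tl ih =>
    cases i with
    | zero => simp [pvOnes]; omega
    | succ j =>
      simp only [List.set_cons_succ, pvOnes, List.map_cons, List.sum_cons, List.getElem_cons_succ]
      have := ih j (by simpa using h)
      simp only [pvOnes] at this; omega

theorem pvGetC_ranges (g : List (List Int)) (r c : Int) (h1 : pvGetC g r c = 1) :
    r.toNat < g.length ∧ c.toNat < (g.getD r.toNat []).length := by
  unfold pvGetC at h1
  constructor
  · by_contra hh
    rw [show g.getD r.toNat [] = [] from List.getD_eq_default _ _ (by omega)] at h1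
    simp at h1
  · by_contra hh
    rw [show (g.getD r.toNat []).getD c.toNat 0 = 0 from List.getD_eq_default _ _ (by omega)] at h1
    exact absurd h1 (by norm_num)

theorem pvOnes_set_lt (g : List (List Int)) (r c : Int) (h1 : pvGetC g r c = 1) :
    pvOnes (pvSetC g r.toNat c.toNat 0) < pvOnes g := by
  obtain ⟨hrl, hcl⟩ := pvGetC_ranges g r c h1
  have hrow : g[r.toNat] = g.getD r.toNat [] := by
    rw [List.getD_eq_getElem?_getD, List.getElem?_eq_getElem hrl]; rfl
  have hcell : (g.getD r.toNat [])[c.toNat] = 1 := by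
    unfold pvGetC at h1
    rwa [List.getD_eq_getElem?_getD (l := g.getD r.toNat []), List.getElem?_eq_getElem hcl] at h1
  have hcount : ((g.getD r.toNat []).set c.toNat 0).count 1 < (g.getD r.toNat []).count 1 := by
    rw [List.count_set hcl, hcell]
    have h2 : 1 ≤ (g.getD r.toNat []).count 1 := by
      refine List.count_pos_iff.mpr ?_
      rw [← hcell]; exact (g.getD r.toNat []).getElem_mem hcl
    simp only [BEq.rfl, if_true]
    rw [if_neg (by decide)]
    omega
  have hmain := pvOnes_set g r.toNat ((g.getD r.toNat []).set c.toNat 0) hrl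
  rw [hrow] at hmain
  unfold pvSetC; omega

-- the while-stack loop of B; the Lean list head is the Python stack top (stack.pop()
-- pops the end of the Python list, stack.extend pushes so that (r+1,c) is popped first)
def floodLoop (nrows ncols : Int) (grid : List (List Int)) (stack : List (Int × Int))
    (st : Int × Int × Int) : List (List Int) × (Int × Int × Int) :=
  match stack with
  | [] => (grid, st)
  | (r, c) :: rest =>
    if h : 0 ≤ r ∧ r < nrows ∧ 0 ≤ c ∧ c < ncols ∧ pvGetC grid r c = 1 then
      floodLoop nrows ncols (pvSetC grid r.toNat c.toNat 0)
        ((r+1, c) :: (r-1, c) :: (r, c+1) :: (r, c-1) :: rest)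
        (st.1 + 1, min st.2.1 c, max st.2.2 c)
    else floodLoop nrows ncols grid rest st
termination_by (pvOnes grid, stack.length)
decreasing_by
  · exact Prod.Lex.left _ _ (pvOnes_set_lt grid r c h.2.2.2.2)
  · exact Prod.Lex.right _ (by simp)

-- sums[j] += count for j in range(mn, mx+1) (all indices are in [0, len sums) here)
def pvAddRange (sums : List Int) (count mn mx : Int) : List Int :=
  (PySem.List.pyRange mn (mx + 1) 1).foldl (fun s j => s.set j.toNat (s.getD j.toNat 0 + count)) sums

def solution_alt (land : List (List Int)) : Int :=
  let nrows : Int := land.length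
  let ncols : Int := (land.headD []).length
  let fin := (PySem.List.pyRange 0 nrows 1).foldl (fun st r0 =>
      (PySem.List.pyRange 0 ncols 1).foldl (fun st c0 =>
        if pvGetC st.1 r0 c0 = 1 then
          let p := floodLoop nrows ncols st.1 [(r0, c0)] (0, c0, c0)
          (p.1, pvAddRange st.2 p.2.1 p.2.2.1 p.2.2.2)
        else st) st) (land, List.replicate ncols.toNat (0 : Int))
  (PySem.List.max? fin.2 (fun x => x)).getD 0

-- ===== PRECONDITION & SPEC =====
-- Pre_ restricts to nonempty rectangular grids with at least one column — the puzzle's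
-- natural domain.  Outside it A raises (IndexError on land[0], or on a missing cell of
-- a ragged row reached by the fill; ValueError on max() with zero columns); on some
-- ragged grids whose short/long rows are never reached A still returns a value — those
-- are excluded too (see the cited examples in the claim).
def Pre_solution (land : List (List Int)) : Prop :=
  land ≠ [] ∧ 0 < (land.headD []).length ∧
    ∀ row ∈ land, row.length = (land.headD []).length
instance (land : List (List Int)) : Decidable (Pre_solution land) := by
  unfold Pre_solution; infer_instance
def pvWitness_solution : List (List Int) := [[1, 0, 1], [0, 1, 1]]
def Spec_solution (land : List (List Int)) (out : Int) : Prop := out = solution_alt land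
instance (land : List (List Int)) (out : Int) : Decidable (Spec_solution land out) := by
  unfold Spec_solution; infer_instance

-- ===== CLAIM (what is proved, stated in full; the proofs are below) =====
def Claim_equal_solution : Prop :=
  ∀ (land : List (List Int)), Dom_solution land → Pre_solution land →
    Spec_solution land (solution land)

-- ===== LEMMAS AND PROOFS =====

-- the min/max updates of A's record_col and of B's loop body are the same function
theorem pvRecord_eq (g : Int × Int × Int) (c : Int) :
    pvRecord g c = (g.1 + 1, min g.2.1 c, max g.2.2 c) := by
  simp only [pvRecord, min_def, max_def, Prod.ext_iff]
  split_ifs <;> simp <;> omega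

theorem ones_outGas_le (nrows ncols : Int) :
    ∀ (f : Nat) (grid : List (List Int)) (r c : Int) (st : Int × Int × Int),
    pvOnes (outGas nrows ncols f grid r c st).1 ≤ pvOnes grid := by
  intro f
  induction f with
  | zero => intro grid r c st; simp [outGas]
  | succ f ih =>
    intro grid r c st
    by_cases hb : (r ≥ nrows ∨ c ≥ ncols ∨ r < 0 ∨ c < 0)
    · simp [outGas, hb]
    · by_cases hcell : pvGetC grid r c = 1
      · simp only [outGas, if_neg hb, if_pos hcell]
        have h1 := pvOnes_set_lt grid r c hcell
        calc _ ≤ _ := ih _ r (c-1) _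
        _ ≤ _ := ih _ r (c+1) _
        _ ≤ _ := ih _ (r-1) c _
        _ ≤ _ := ih _ (r+1) c _
        _ ≤ pvOnes grid := h1.le
      · simp [outGas, hb, hcell]

-- KEY SIMULATION: B's stack loop run from (r,c)::rest is A's DFS from (r,c) followed by
-- the loop on rest — the stack linearises exactly A's recursion (pop order r+1,r-1,c+1,c-1)
theorem flood_eq_outGas (nrows ncols : Int) :
    ∀ (f : Nat) (grid : List (List Int)) (r c : Int) (st : Int × Int × Int)
      (rest : List (Int × Int)), pvOnes grid < f →
    floodLoop nrows ncols grid ((r, c) :: rest) st =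
      floodLoop nrows ncols (outGas nrows ncols f grid r c st).1 rest
        (outGas nrows ncols f grid r c st).2 := by
  intro f
  induction f with
  | zero => intro grid r c st rest h; omega
  | succ f ih =>
    intro grid r c st rest h
    by_cases hb : (r ≥ nrows ∨ c ≥ ncols ∨ r < 0 ∨ c < 0)
    · rw [floodLoop]
      simp only [outGas, if_pos hb]
      rw [dif_neg (by omega)]
    · by_cases hcell : pvGetC grid r c = 1
      · have hlt := pvOnes_set_lt grid r c hcell
        rw [floodLoop, dif_pos (by exact ⟨by omega, by omega, by omega, by omega, hcell⟩)]
        simp only [outGas, if_neg hb, if_pos hcell]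
        rw [pvRecord_eq st c]
        have o1 := ones_outGas_le nrows ncols f (pvSetC grid r.toNat c.toNat 0) (r+1) c (st.1 + 1, min st.2.1 c, max st.2.2 c)
        rw [ih _ (r+1) c _ _ (by omega)]
        set p1 := outGas nrows ncols f (pvSetC grid r.toNat c.toNat 0) (r+1) c (st.1 + 1, min st.2.1 c, max st.2.2 c) with hp1
        have o2 := ones_outGas_le nrows ncols f p1.1 (r-1) c p1.2
        rw [ih p1.1 (r-1) c p1.2 _ (by omega)]
        set p2 := outGas nrows ncols f p1.1 (r-1) c p1.2 with hp2
        have o3 := ones_outGas_le nrows ncols f p2.1 r (c+1) p2.2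
        rw [ih p2.1 r (c+1) p2.2 _ (by omega)]
        set p3 := outGas nrows ncols f p2.1 r (c+1) p2.2 with hp3
        rw [ih p3.1 r (c-1) p3.2 _ (by omega)]
      · rw [floodLoop, dif_neg (by simp [hcell])]
        simp only [outGas, if_neg hb, if_neg hcell]

-- one component: B's flood fill started at a 1-cell equals A's out_gas call with the
-- fuel chosen in the port (A's Gas starts at (0, ncols, 0), B at (0, c, c): after the
-- first cell both states are (1, c, c))
theorem flood_start (nrows ncols : Int) (grid : List (List Int)) (r c : Int)
    (hr0 : 0 ≤ r) (hr : r < nrows) (hc0 : 0 ≤ c) (hc : c < ncols)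
    (hcell : pvGetC grid r c = 1) :
    floodLoop nrows ncols grid [(r, c)] (0, c, c) =
      outGas nrows ncols (pvOnes grid + 1) grid r c (0, ncols, 0) := by
  have hlt := pvOnes_set_lt grid r c hcell
  rw [floodLoop, dif_pos ⟨hr0, hr, hc0, hc, hcell⟩]
  simp only [min_self, max_self, zero_add]
  simp only [outGas, if_neg (by omega : ¬(r ≥ nrows ∨ c ≥ ncols ∨ r < 0 ∨ c < 0)), if_pos hcell]
  rw [pvRecord_eq]
  simp only [min_eq_right hc.le, max_eq_right hc0, zero_add]
  have o1 := ones_outGas_le nrows ncols (pvOnes grid) (pvSetC grid r.toNat c.toNat 0) (r+1) c (1, c, c)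
  rw [flood_eq_outGas nrows ncols (pvOnes grid) _ (r+1) c _ _ (by omega)]
  set p1 := outGas nrows ncols (pvOnes grid) (pvSetC grid r.toNat c.toNat 0) (r+1) c (1, c, c) with hp1
  have o2 := ones_outGas_le nrows ncols (pvOnes grid) p1.1 (r-1) c p1.2
  rw [flood_eq_outGas nrows ncols (pvOnes grid) p1.1 (r-1) c p1.2 _ (by omega)]
  set p2 := outGas nrows ncols (pvOnes grid) p1.1 (r-1) c p1.2 with hp2
  have o3 := ones_outGas_le nrows ncols (pvOnes grid) p2.1 r (c+1) p2.2
  rw [flood_eq_outGas nrows ncols (pvOnes grid) p2.1 r (c+1) p2.2 _ (by omega)]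
  set p3 := outGas nrows ncols (pvOnes grid) p2.1 r (c+1) p2.2 with hp3
  rw [flood_eq_outGas nrows ncols (pvOnes grid) p3.1 r (c-1) p3.2 _ (by omega)]
  rw [floodLoop]

theorem pvSetC_shape (g : List (List Int)) (r c : Nat) (v : Int) :
    (pvSetC g r c v).map List.length = g.map List.length := by
  unfold pvSetC
  rw [List.map_set]
  by_cases hr : r < g.length
  · have : ((g.getD r []).set c v).length = (g.map List.length).getD r 0 := by
      rw [List.length_set]
      rw [List.getD_eq_getElem?_getD (l := List.map List.length g), List.getElem?_map,
        List.getElem?_eq_getElem hr]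
      rw [List.getD_eq_getElem?_getD (l := g), List.getElem?_eq_getElem hr]
      rfl
    rw [this, List.getD_eq_getElem?_getD, List.getElem?_eq_getElem (by simpa using hr)]
    exact List.set_getElem_self _
  · rw [List.set_eq_of_length_le (by simpa using not_lt.mp hr)]

theorem outGas_shape (nrows ncols : Int) :
    ∀ (f : Nat) (grid : List (List Int)) (r c : Int) (st : Int × Int × Int),
    ((outGas nrows ncols f grid r c st).1).map List.length = grid.map List.length := by
  intro f
  induction f with
  | zero => intro grid r c st; simp [outGas]
  | succ f ih =>
    intro grid r c st
    by_cases hb : (r ≥ nrows ∨ c ≥ ncols ∨ r < 0 ∨ c < 0)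
    · simp [outGas, hb]
    · by_cases hcell : pvGetC grid r c = 1
      · simp only [outGas, if_neg hb, if_pos hcell]
        rw [ih, ih, ih, ih, pvSetC_shape]
      · simp [outGas, hb, hcell]

-- the recorded column range stays inside [0, ncols): needed so that g.report only
-- touches existing keys / in-range indices
theorem outGas_state (nrows ncols : Int) :
    ∀ (f : Nat) (grid : List (List Int)) (r c : Int) (st : Int × Int × Int),
    0 ≤ st.2.1 → st.2.2 < ncols →
    0 ≤ (outGas nrows ncols f grid r c st).2.2.1 ∧
      (outGas nrows ncols f grid r c st).2.2.2 < ncols := by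
  intro f
  induction f with
  | zero => intro grid r c st h1 h2; simp [outGas]; omega
  | succ f ih =>
    intro grid r c st h1 h2
    by_cases hb : (r ≥ nrows ∨ c ≥ ncols ∨ r < 0 ∨ c < 0)
    · simp [outGas, hb]; omega
    · by_cases hcell : pvGetC grid r c = 1
      · simp only [outGas, if_neg hb, if_pos hcell]
        have hrec : 0 ≤ (pvRecord st c).2.1 ∧ (pvRecord st c).2.2 < ncols := by
          unfold pvRecord
          constructor <;> simp <;> split_ifs <;> omega
        have s1 := ih (pvSetC grid r.toNat c.toNat 0) (r+1) c (pvRecord st c) hrec.1 hrec.2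
        set p1 := outGas nrows ncols f (pvSetC grid r.toNat c.toNat 0) (r+1) c (pvRecord st c) with hp1
        have s2 := ih p1.1 (r-1) c p1.2 s1.1 s1.2
        set p2 := outGas nrows ncols f p1.1 (r-1) c p1.2 with hp2
        have s3 := ih p2.1 r (c+1) p2.2 s2.1 s2.2
        set p3 := outGas nrows ncols f p2.1 r (c+1) p2.2 with hp3
        exact ih p3.1 r (c-1) p3.2 s3.1 s3.2
      · simp [outGas, hb, hcell]; omega

-- the invariant tying A's cols dict to B's column-sum list:
-- keys are 0..ncN-1 in order and the values agree pointwise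
def pvInv (ncN : Nat) (d : PySem.Dict Int Int) (cs : List Int) : Prop :=
  cs.length = ncN ∧ d.keys = PySem.List.pyRange 0 (ncN : Int) 1 ∧
    ∀ j : Nat, j < ncN → d.getD (j : Int) 0 = cs.getD j 0

theorem cols0_inv (n : Nat) :
    pvInv n ((PySem.List.pyRange 0 (n : Int) 1).foldl (fun d i => d.insert i 0) PySem.Dict.empty)
      (List.replicate n (0 : Int)) := by
  induction n with
  | zero =>
    refine ⟨by simp, ?_, by omega⟩
    rw [PySem.List.pyRange_one_eq_nil (by omega)]
    simp
  | succ n ih =>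
    obtain ⟨-, hkeys, hgetD⟩ := ih
    have hsplit : PySem.List.pyRange 0 ((n + 1 : Nat) : Int) 1
        = PySem.List.pyRange 0 (n : Int) 1 ++ [(n : Int)] := by
      push_cast
      exact PySem.List.pyRange_one_succ_right (by omega)
    have hnotmem : ((PySem.List.pyRange 0 (n : Int) 1).foldl
        (fun d i => d.insert i 0) (PySem.Dict.empty : PySem.Dict Int Int)).contains (n : Int) = false := by
      rw [PySem.Dict.contains_eq_decide_mem_keys, hkeys]
      simp [PySem.List.mem_pyRange_one]
    refine ⟨by simp, ?_, ?_⟩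
    · rw [hsplit, List.foldl_append]
      simp only [List.foldl_cons, List.foldl_nil]
      rw [PySem.Dict.keys_insert_of_not_contains _ _ hnotmem, hkeys]
    · intro j hj
      rw [hsplit, List.foldl_append]
      simp only [List.foldl_cons, List.foldl_nil]
      rw [PySem.Dict.getD_insert]
      have hrep : (List.replicate (n+1) (0:Int)).getD j 0 = 0 := by
        simp [List.getD_eq_getElem?_getD, hj]
      rw [hrep]
      by_cases hje : (j : Int) = (n : Int)
      · rw [if_pos hje]
      · rw [if_neg hje]
        have hjn : j < n := by
          have : j ≠ n := fun h => hje (by rw [h])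
          omega
        rw [hgetD j hjn]
        simp [List.getD_eq_getElem?_getD, hjn]

theorem pvInv_step (ncN : Nat) (d : PySem.Dict Int Int) (cs : List Int) (v j : Int)
    (hj0 : 0 ≤ j) (hjn : j < (ncN : Int)) (hInv : pvInv ncN d cs) :
    pvInv ncN (d.modify j 0 (· + v)) (cs.set j.toNat (cs.getD j.toNat 0 + v)) := by
  obtain ⟨hlen, hkeys, hgetD⟩ := hInv
  refine ⟨by simp [hlen], ?_, ?_⟩
  · rw [PySem.Dict.keys_modify, PySem.Dict.keys_insert_of_contains, hkeys]
    rw [PySem.Dict.contains_eq_decide_mem_keys, hkeys]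
    simp [PySem.List.mem_pyRange_one]
    omega
  · intro i hi
    rw [PySem.Dict.getD_modify]
    by_cases hij : (i : Int) = j
    · subst hij
      rw [if_pos rfl]
      simp only [Int.toNat_natCast]
      rw [hgetD i hi]
      rw [List.getD_eq_getElem?_getD (l := cs.set i _), List.getElem?_set_self (by omega)]
      rfl
    · rw [if_neg hij]
      rw [hgetD i hi]
      rw [List.getD_eq_getElem?_getD (l := cs.set j.toNat _),
        List.getElem?_set_ne (by omega), ← List.getD_eq_getElem?_getD]

theorem pvInv_fold (ncN : Nat) (v : Int) :
    ∀ (l : List Int) (d : PySem.Dict Int Int) (cs : List Int),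
    (∀ j ∈ l, 0 ≤ j ∧ j < (ncN : Int)) → pvInv ncN d cs →
    pvInv ncN (l.foldl (fun d c => d.modify c 0 (· + v)) d)
      (l.foldl (fun s j => s.set j.toNat (s.getD j.toNat 0 + v)) cs) := by
  intro l
  induction l with
  | nil => intro d cs _ h; simpa using h
  | cons hd tl ih =>
    intro d cs hmem hInv
    simp only [List.foldl_cons]
    exact ih _ _ (fun j hj => hmem j (by simp [hj]))
      (pvInv_step ncN d cs v hd (hmem hd (by simp)).1 (hmem hd (by simp)).2 hInv)

theorem pvInv_report (ncN : Nat) (d : PySem.Dict Int Int) (cs : List Int)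
    (v mn mx : Int) (hmn : 0 ≤ mn) (hmx : mx < (ncN : Int)) (hInv : pvInv ncN d cs) :
    pvInv ncN (pvReport d (v, mn, mx)) (pvAddRange cs v mn mx) := by
  unfold pvReport pvAddRange
  dsimp only
  refine pvInv_fold ncN v _ d cs ?_ hInv
  intro j hjm
  rw [PySem.List.mem_pyRange_one] at hjm
  omega

theorem pvInv_values (ncN : Nat) (d : PySem.Dict Int Int) (cs : List Int)
    (h : pvInv ncN d cs) : d.values = cs := by
  obtain ⟨hlen, hkeys, hgetD⟩ := h
  have hnd : d.keys.Nodup := hkeys ▸ PySem.List.nodup_pyRange_one 0 (ncN : Int)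
  rw [PySem.Dict.values_eq_map_keys d hnd 0, hkeys, PySem.List.pyRange_zero_nat, List.map_map]
  apply List.ext_getElem (by simp [hlen])
  intro i h1 h2
  simp only [List.getElem_map, List.getElem_range, Function.comp_apply]
  have hi : i < ncN := by simpa using h1
  rw [hgetD i hi, List.getD_eq_getElem?_getD, List.getElem?_eq_getElem h2]
  rfl

theorem mapLen_getD (g : List (List Int)) (rn : Nat) :
    (g.map List.length).getD rn 0 = (g.getD rn []).length := by
  by_cases h : rn < g.length
  · rw [List.getD_eq_getElem?_getD, List.getElem?_map, List.getElem?_eq_getElem h,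
      List.getD_eq_getElem?_getD (l := g), List.getElem?_eq_getElem h]
    rfl
  · rw [List.getD_eq_default _ _ (by simpa using not_lt.mp h),
      List.getD_eq_default _ _ (not_lt.mp h)]
    rfl

theorem inner_sim (nrows ncols : Int) (ncN : Nat) (hnc : ncols = (ncN : Int)) (hpos : 0 < ncN)
    (land0 : List (List Int)) (r : Int) (hr0 : 0 ≤ r) (hr : r < nrows) :
    ∀ (cl : List Int) (grid : List (List Int)) (d : PySem.Dict Int Int) (cs : List Int),
    (∀ c ∈ cl, 0 ≤ c ∧ c < ncols) → pvInv ncN d cs →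
    grid.map List.length = land0.map List.length →
    (cl.foldl (fun st col =>
        if pvGetC st.1 r col = 1 then
          let p := outGas nrows ncols (pvOnes st.1 + 1) st.1 r col (0, ncols, 0)
          (p.1, pvReport st.2 p.2)
        else st) (grid, d)).1 =
      (cl.foldl (fun st c0 =>
        if pvGetC st.1 r c0 = 1 then
          let p := floodLoop nrows ncols st.1 [(r, c0)] (0, c0, c0)
          (p.1, pvAddRange st.2 p.2.1 p.2.2.1 p.2.2.2)
        else st) (grid, cs)).1 ∧
    pvInv ncN
      (cl.foldl (fun st col =>
        if pvGetC st.1 r col = 1 then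
          let p := outGas nrows ncols (pvOnes st.1 + 1) st.1 r col (0, ncols, 0)
          (p.1, pvReport st.2 p.2)
        else st) (grid, d)).2
      (cl.foldl (fun st c0 =>
        if pvGetC st.1 r c0 = 1 then
          let p := floodLoop nrows ncols st.1 [(r, c0)] (0, c0, c0)
          (p.1, pvAddRange st.2 p.2.1 p.2.2.1 p.2.2.2)
        else st) (grid, cs)).2 ∧
    ((cl.foldl (fun st col =>
        if pvGetC st.1 r col = 1 then
          let p := outGas nrows ncols (pvOnes st.1 + 1) st.1 r col (0, ncols, 0)
          (p.1, pvReport st.2 p.2)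
        else st) (grid, d)).1).map List.length = land0.map List.length := by
  intro cl
  induction cl with
  | nil =>
    intro grid d cs _ hInv hsh
    exact ⟨rfl, hInv, hsh⟩
  | cons c0 tl ih =>
    intro grid d cs hmem hInv hsh
    have hc := hmem c0 (by simp)
    simp only [List.foldl_cons]
    by_cases hcell : pvGetC grid r c0 = 1
    · rw [if_pos hcell, if_pos hcell]
      have hfs := flood_start nrows ncols grid r c0 hr0 hr hc.1 (by omega) hcell
      rw [hfs]
      have hst := outGas_state nrows ncols (pvOnes grid + 1) grid r c0 (0, ncols, 0)
        (by simp; omega) (by simp; omega)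
      set p := outGas nrows ncols (pvOnes grid + 1) grid r c0 (0, ncols, 0) with hp
      have hInv' : pvInv ncN (pvReport d p.2) (pvAddRange cs p.2.1 p.2.2.1 p.2.2.2) := by
        have := pvInv_report ncN d cs p.2.1 p.2.2.1 p.2.2.2 hst.1 (by omega) hInv
        simpa using this
      refine ih p.1 (pvReport d p.2) (pvAddRange cs p.2.1 p.2.2.1 p.2.2.2)
        (fun c hcm => hmem c (by simp [hcm])) hInv' ?_
      rw [outGas_shape, hsh]
    · rw [if_neg hcell, if_neg hcell]
      exact ih grid d cs (fun c hcm => hmem c (by simp [hcm])) hInv hsh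

theorem outer_sim (nrows ncols : Int) (ncN : Nat) (hnc : ncols = (ncN : Int)) (hpos : 0 < ncN)
    (land0 : List (List Int)) (hnr : nrows = (land0.length : Int))
    (hrect : ∀ row ∈ land0, row.length = ncN) :
    ∀ (rl : List Int) (grid : List (List Int)) (d : PySem.Dict Int Int) (cs : List Int),
    (∀ r ∈ rl, 0 ≤ r ∧ r < nrows) → pvInv ncN d cs →
    grid.map List.length = land0.map List.length →
    (rl.foldl (fun st row =>
        (PySem.List.pyRange 0 (((st.1.getD row.toNat []).length : Int)) 1).foldl (fun st col =>
          if pvGetC st.1 row col = 1 then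
            let p := outGas nrows ncols (pvOnes st.1 + 1) st.1 row col (0, ncols, 0)
            (p.1, pvReport st.2 p.2)
          else st) st) (grid, d)).2.values =
      (rl.foldl (fun st r0 =>
        (PySem.List.pyRange 0 ncols 1).foldl (fun st c0 =>
          if pvGetC st.1 r0 c0 = 1 then
            let p := floodLoop nrows ncols st.1 [(r0, c0)] (0, c0, c0)
            (p.1, pvAddRange st.2 p.2.1 p.2.2.1 p.2.2.2)
          else st) st) (grid, cs)).2 := by
  intro rl
  induction rl with
  | nil =>
    intro grid d cs _ hInv hsh
    exact pvInv_values ncN d cs hInv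
  | cons r tl ih =>
    intro grid d cs hmem hInv hsh
    have hrb := hmem r (by simp)
    simp only [List.foldl_cons]
    have hrow : (grid.getD r.toNat []).length = ncN := by
      have h1 : (grid.getD r.toNat []).length = (land0.getD r.toNat []).length := by
        rw [← mapLen_getD, ← mapLen_getD, hsh]
      have hrn : r.toNat < land0.length := by omega
      have h2 : land0.getD r.toNat [] = land0[r.toNat] := by
        rw [List.getD_eq_getElem?_getD, List.getElem?_eq_getElem hrn]
        rfl
      rw [h1, h2, hrect _ (land0.getElem_mem hrn)]
    rw [hrow, ← hnc]
    have hin := inner_sim nrows ncols ncN hnc hpos land0 r hrb.1 hrb.2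
      (PySem.List.pyRange 0 ncols 1) grid d cs
      (fun c hcm => by
        rw [PySem.List.mem_pyRange_one] at hcm
        exact ⟨hcm.1, hcm.2⟩) hInv hsh
    obtain ⟨hg, hInv', hsh'⟩ := hin
    set pA := (PySem.List.pyRange 0 ncols 1).foldl (fun st col =>
          if pvGetC st.1 r col = 1 then
            let p := outGas nrows ncols (pvOnes st.1 + 1) st.1 r col (0, ncols, 0)
            (p.1, pvReport st.2 p.2)
          else st) (grid, d) with hpA
    set pB := (PySem.List.pyRange 0 ncols 1).foldl (fun st c0 =>
          if pvGetC st.1 r c0 = 1 then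
            let p := floodLoop nrows ncols st.1 [(r, c0)] (0, c0, c0)
            (p.1, pvAddRange st.2 p.2.1 p.2.2.1 p.2.2.2)
          else st) (grid, cs) with hpB
    have hpair : pA = (pA.1, pA.2) := rfl
    have hpairB : pB = (pB.1, pB.2) := rfl
    rw [hpair, hpairB, hg]
    exact ih pB.1 pA.2 pB.2 (fun x hx => hmem x (by simp [hx])) hInv' (hg ▸ hsh')

theorem solution_eq (land : List (List Int))
    (hpos : 0 < (land.headD []).length)
    (hrect : ∀ row ∈ land, row.length = (land.headD []).length) :
    solution land = solution_alt land := by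
  unfold solution solution_alt
  simp only [Int.toNat_natCast]
  congr 1
  have h := outer_sim (land.length : Int) ((land.headD []).length : Int) (land.headD []).length
    rfl hpos land rfl hrect (PySem.List.pyRange 0 (land.length : Int) 1) land _ _
    (fun r hr => by rw [PySem.List.mem_pyRange_one] at hr; exact ⟨hr.1, hr.2⟩)
    (cols0_inv _) rfl
  rw [h]

-- ===== VERDICT (by name: the statement is the Claim_ definition above) =====
theorem solution_spec : Claim_equal_solution := by
  intro land _ hpre
  unfold Spec_solution
  exact solution_eq land hpre.2.1 hpre.2.2
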